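-- pv_equiv track=rewrite | github.com/alantang1977/X | .github/scripts/generate_plugins.py | group_sites_by_name
-- ===== SOURCE A (Python) =====
-- from typing import List, Dict, Any
--
-- def group_sites_by_name(sites: List[Dict[str, Any]]) -> List[Dict[str, Any]]:
--     """按名称分组站点，相同名称的放在一起"""
--     grouped = {}
--
--     for site in sites:
--         name = site["name"]
--         if name not in grouped:
--             grouped[name] = []
--         grouped[name].append(site)
--
--     # 展平并按名称排序
--     result = []
--     for name in sorted(grouped.keys()):
--         result.extend(grouped[name])
--
--     return result
-- ===== SOURCE B (Python) =====
-- from typing import List, Dict, Any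
--
-- def group_sites_by_name(sites: List[Dict[str, Any]]) -> List[Dict[str, Any]]:
--     """Single stable sort by name: equal-name sites keep their input order,
--     which is exactly A's grouped append order."""
--     return sorted(sites, key=lambda site: site["name"])
-- ===== Notes on version B (the rewrite author's own statement) =====
-- stated objective: simpler
-- what changed: Drops A's build-a-grouping-dict-then-flatten-over-sorted-keys pipeline and returns one stable sort of the input by its 'name' field; stability reproduces A's within-group order.
import Mathlib
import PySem

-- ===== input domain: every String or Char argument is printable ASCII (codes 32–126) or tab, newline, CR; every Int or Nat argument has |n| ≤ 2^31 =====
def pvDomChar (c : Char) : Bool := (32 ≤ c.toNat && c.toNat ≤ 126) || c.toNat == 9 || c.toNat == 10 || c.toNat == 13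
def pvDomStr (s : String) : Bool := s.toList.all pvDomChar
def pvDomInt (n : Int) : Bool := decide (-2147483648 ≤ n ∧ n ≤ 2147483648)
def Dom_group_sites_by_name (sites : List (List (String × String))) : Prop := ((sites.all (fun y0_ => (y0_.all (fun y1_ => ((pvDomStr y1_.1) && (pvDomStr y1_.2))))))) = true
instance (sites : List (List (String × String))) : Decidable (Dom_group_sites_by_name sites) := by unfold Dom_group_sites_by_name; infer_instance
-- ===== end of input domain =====

-- B replaces A's grouping-dict-then-flatten-by-sorted-keys pipeline with one stable sort by the "name"
-- field (objective: simpler). Return-value equivalence on inputs where every site dict has a "name" key.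

-- ===== PORT A =====
-- site["name"] (used by both ports); total via default "" — exact under Pre_ (the key is present)
def pvName (site : List (String × String)) : String :=
  (PySem.Dict.mk site).getD "name" ""

def group_sites_by_name (sites : List (List (String × String))) : List (List (String × String)) :=
  let grouped : PySem.Dict String (List (List (String × String))) :=
    sites.foldl (fun g site =>
      let name := pvName site
      let g' := if g.contains name then g else g.insert name []
      g'.modify name [] (fun l => l ++ [site])) PySem.Dict.empty
  (PySem.List.sorted grouped.keys (fun k => k) false).foldl
    (fun res name => res ++ grouped.getD name []) []

-- ===== PORT B =====
def group_sites_by_name_alt (sites : List (List (String × String))) : List (List (String × String)) :=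
  PySem.List.sorted sites pvName false

-- ===== PRECONDITION & SPEC =====
-- Pre_ excludes site dicts without a "name" key: there both Pythons raise KeyError.
def Pre_group_sites_by_name (sites : List (List (String × String))) : Prop :=
  ∀ site ∈ sites, (PySem.Dict.mk site).contains "name" = true
instance (sites : List (List (String × String))) : Decidable (Pre_group_sites_by_name sites) := by unfold Pre_group_sites_by_name; infer_instance
def pvWitness_group_sites_by_name : (List (List (String × String))) :=
  [[("name", "b"), ("url", "x")], [("name", "a")], [("name", "b")]]

def Spec_group_sites_by_name (sites : List (List (String × String))) (out : List (List (String × String))) : Prop := out = group_sites_by_name_alt sites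
instance (sites : List (List (String × String))) (out : List (List (String × String))) : Decidable (Spec_group_sites_by_name sites out) := by unfold Spec_group_sites_by_name; infer_instance

-- ===== CLAIM (what is proved, stated in full; the proofs are below) =====
def Claim_equal_group_sites_by_name : Prop := ∀ (sites : List (List (String × String))), Dom_group_sites_by_name sites → Pre_group_sites_by_name sites → Spec_group_sites_by_name sites (group_sites_by_name sites)

-- ===== LEMMAS AND PROOFS =====

-- modifying a key just inserted empty is modifying it directly (the missing-key branch of A's loop)
theorem pv_modify_insert_nil {κ ν : Type} [BEq κ] [LawfulBEq κ] (d : PySem.Dict κ ν) (k : κ)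
    (dflt : ν) (f : ν → ν) (h : d.contains k = false) :
    (d.insert k dflt).modify k dflt f = d.modify k dflt f := by
  simp [PySem.Dict.modify, PySem.Dict.insert_insert_self, PySem.Dict.getD_insert_self,
    PySem.Dict.getD_of_not_contains d dflt h]

-- A's loop body is a plain grouped[name] = grouped.get(name, []) + [site]
theorem pv_groupedA_eq (sites : List (List (String × String))) :
    sites.foldl (fun g site =>
      let name := pvName site
      let g' := if g.contains name then g else g.insert name []
      g'.modify name [] (fun l => l ++ [site])) PySem.Dict.empty
    = sites.foldl (fun g site => g.modify (pvName site) [] (fun l => l ++ [site]))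
        PySem.Dict.empty := by
  apply PySem.List.foldl_congr_mem
  intro acc x _
  by_cases h : acc.contains (pvName x) = true
  · simp [h]
  · simp only [Bool.not_eq_true] at h
    simp [h, pv_modify_insert_nil acc (pvName x) [] _ h]

theorem pv_getD_grouped (sites : List (List (String × String))) (k : String) :
    (sites.foldl (fun g site => g.modify (pvName site) [] (fun l => l ++ [site]))
        PySem.Dict.empty).getD k []
    = sites.filter (fun s => pvName s == k) := by
  have h := PySem.Dict.getD_foldl_modify_append (sites.map (fun s => (pvName s, s)))
      PySem.Dict.empty k
  rw [List.foldl_map] at h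
  rw [h]
  simp [List.filter_map, Function.comp_def, List.map_map]

theorem pv_keys_grouped (sites : List (List (String × String))) :
    (sites.foldl (fun g site => g.modify (pvName site) [] (fun l => l ++ [site]))
        PySem.Dict.empty).keys
    = PySem.Set.ofList (sites.map pvName) := by
  have h := PySem.Dict.keys_foldl_modify_key sites pvName ([] : List (List (String × String)))
      (fun _ x l => l ++ [x]) PySem.Dict.empty
  simpa [PySem.Set.update, PySem.Set.ofList_eq_foldl, PySem.Dict.keys_empty] using h

theorem pv_pairwise_of_forall_mem {α : Type} {R : α → α → Prop} :
    ∀ {l : List α}, (∀ a ∈ l, ∀ b ∈ l, R a b) → l.Pairwise R := by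
  intro l
  induction l with
  | nil => intro _; exact List.Pairwise.nil
  | cons x t ih =>
    intro h
    refine List.Pairwise.cons (fun b hb => h x (by simp) b (by simp [hb])) (ih ?_)
    intro a ha b hb
    exact h a (by simp [ha]) b (by simp [hb])

theorem pv_filter_insertBy {α : Type} (key : α → String) (x : α) (k : String) :
    ∀ (l : List α), l.Pairwise (fun a b => key a ≤ key b) →
    (PySem.List.insertBy (fun a b => decide (key a < key b)) x l).filter (fun y => key y == k)
      = l.filter (fun y => key y == k) ++ (if key x == k then [x] else []) := by
  intro l
  induction l with
  | nil =>
    intro _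
    by_cases hx : key x == k <;> simp [PySem.List.insertBy, hx]
  | cons y ys ih =>
    intro hl
    rcases List.pairwise_cons.mp hl with ⟨hy, ht⟩
    by_cases h : key x < key y
    · by_cases hx : (key x == k) = true
      · have hk : key x = k := by simpa using hx
        have hnil : (y :: ys).filter (fun z => key z == k) = [] := by
          apply List.filter_eq_nil_iff.mpr
          intro z hz
          have hz' : key y ≤ key z := by
            rcases List.mem_cons.mp hz with rfl | hz2
            · exact le_refl _
            · exact hy z hz2
          have : k < key z := lt_of_lt_of_le (hk ▸ h) hz'
          simp [ne_of_gt this]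
        simp [PySem.List.insertBy, h, hx, hnil]
      · simp only [Bool.not_eq_true] at hx
        simp [PySem.List.insertBy, h, List.filter_cons, hx]
    · simp only [PySem.List.insertBy, decide_eq_true_eq, h, if_false]
      rw [List.filter_cons, List.filter_cons, ih ht]
      by_cases hyk : (key y == k) = true <;> simp [hyk]

theorem pv_filter_foldl_insertBy {α : Type} (key : α → String) (k : String) :
    ∀ (xs acc : List α), acc.Pairwise (fun a b => key a ≤ key b) →
    (xs.foldl (fun acc x => PySem.List.insertBy (fun a b => decide (key a < key b)) x acc)
        acc).filter (fun y => key y == k)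
      = acc.filter (fun y => key y == k) ++ xs.filter (fun y => key y == k) := by
  intro xs
  induction xs with
  | nil => intro acc _; simp
  | cons x t ih =>
    intro acc hacc
    simp only [List.foldl_cons]
    rw [ih _ (PySem.List.insertBy_pairwise_le key x acc hacc),
      pv_filter_insertBy key x k acc hacc]
    by_cases hx : (key x == k) = true <;> simp [hx]

theorem pv_filter_sorted {α : Type} (key : α → String) (k : String) (xs : List α) :
    (PySem.List.sorted xs key false).filter (fun y => key y == k)
      = xs.filter (fun y => key y == k) := by
  rw [PySem.List.sorted_eq_foldl_insertBy]
  simpa using pv_filter_foldl_insertBy key k xs [] List.Pairwise.nil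

-- a key-sorted list is determined by its per-key filters (uniqueness of the stable sort)
theorem pv_stable_unique {α : Type} (key : α → String) :
    ∀ (l1 l2 : List α), l1.Pairwise (fun a b => key a ≤ key b) →
      l2.Pairwise (fun a b => key a ≤ key b) →
      (∀ k, l1.filter (fun y => key y == k) = l2.filter (fun y => key y == k)) → l1 = l2 := by
  intro l1
  induction l1 with
  | nil =>
    intro l2 _ _ hf
    cases l2 with
    | nil => rfl
    | cons b t => have := hf (key b); simp at this
  | cons a t1 ih =>
    intro l2 h1 h2 hf
    cases l2 with
    | nil => have := hf (key a); simp at this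
    | cons b t2 =>
      rcases List.pairwise_cons.mp h1 with ⟨ha, ht1⟩
      rcases List.pairwise_cons.mp h2 with ⟨hb, ht2⟩
      have hab : key a = key b := by
        have f1 := hf (key b)
        have hne : (a :: t1).filter (fun y => key y == key b) ≠ [] := by
          rw [f1]; simp
        rcases List.exists_mem_of_ne_nil _ hne with ⟨c, hcf⟩
        rcases List.mem_filter.mp hcf with ⟨hc, hck'⟩
        have hck : key c = key b := by simpa using hck'
        have h1le : key a ≤ key b := by
          rcases List.mem_cons.mp hc with rfl | hc2
          · exact le_of_eq hck
          · exact hck ▸ ha c hc2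
        have f2 := hf (key a)
        have hne2 : (b :: t2).filter (fun y => key y == key a) ≠ [] := by
          rw [← f2]; simp
        rcases List.exists_mem_of_ne_nil _ hne2 with ⟨c2, hcf2⟩
        rcases List.mem_filter.mp hcf2 with ⟨hc2, hck2'⟩
        have hck2 : key c2 = key a := by simpa using hck2'
        have h2le : key b ≤ key a := by
          rcases List.mem_cons.mp hc2 with rfl | hc3
          · exact le_of_eq hck2
          · exact hck2 ▸ hb c2 hc3
        exact le_antisymm h1le h2le
      have hfa := hf (key a)
      rw [List.filter_cons, List.filter_cons] at hfa
      simp only [beq_self_eq_true, if_pos, hab] at hfa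
      have hfa' : a :: t1.filter (fun y => key y == key a)
          = b :: t2.filter (fun y => key y == key a) := by
        simpa [hab] using hfa
      have hab' : a = b := by exact (List.cons.injEq _ _ _ _ ▸ hfa').1
      have htail : t1.filter (fun y => key y == key a) = t2.filter (fun y => key y == key a) :=
        (List.cons.injEq _ _ _ _ ▸ hfa').2
      have hrest : ∀ k, t1.filter (fun y => key y == k) = t2.filter (fun y => key y == k) := by
        intro k
        by_cases hk : key a = k
        · subst hk; exact htail
        · have := hf k
          rw [List.filter_cons, List.filter_cons] at this
          have hka : (key a == k) = false := by simpa using hk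
          have hkb : (key b == k) = false := by simpa [← hab] using hk
          simpa [hka, hkb] using this
      rw [hab', ih t2 ht1 ht2 hrest]

theorem pv_flatMap_single {α : Type} (k0 : String) (F : List α) :
    ∀ (ks : List String), ks.Nodup →
    ks.flatMap (fun k => if k = k0 then F else []) = if k0 ∈ ks then F else [] := by
  intro ks
  induction ks with
  | nil => intro _; simp
  | cons k t ih =>
    intro h
    rcases List.nodup_cons.mp h with ⟨hk, ht⟩
    by_cases e : k = k0
    · subst e
      simp [List.flatMap_cons, hk, ih ht]
    · simp [List.flatMap_cons, e, ih ht, List.mem_cons, Ne.symm e]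

-- the main characterization: flatten of the per-name buckets over the sorted distinct names
-- IS the stable sort by name
theorem pv_main (xs : List (List (String × String))) :
    (PySem.List.sorted (PySem.Set.ofList (xs.map pvName)) (fun k => k) false).flatMap
        (fun k => xs.filter (fun s => pvName s == k))
      = PySem.List.sorted xs pvName false := by
  have hlt : (PySem.List.sorted (PySem.Set.ofList (xs.map pvName)) (fun k => k) false).Pairwise
      (· < ·) := PySem.List.sorted_ofList_pairwise_lt (xs.map pvName)
  have hnd : (PySem.List.sorted (PySem.Set.ofList (xs.map pvName)) (fun k => k) false).Nodup :=
    hlt.imp (fun h => ne_of_lt h)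
  apply pv_stable_unique pvName
  · -- pairwise ≤ on the flattened buckets
    rw [List.pairwise_flatMap]
    constructor
    · intro k _
      apply pv_pairwise_of_forall_mem
      intro a hain b hbin
      have hak : pvName a = k := by simpa using (List.mem_filter.mp hain).2
      have hbk : pvName b = k := by simpa using (List.mem_filter.mp hbin).2
      rw [hak, hbk]
    · refine hlt.imp ?_
      intro k1 k2 h12 x hx y hy
      have hx1 : pvName x = k1 := by simpa using (List.mem_filter.mp hx).2
      have hy2 : pvName y = k2 := by simpa using (List.mem_filter.mp hy).2
      rw [hx1, hy2]; exact le_of_lt h12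
  · exact PySem.List.sorted_pairwise xs pvName
  · intro k0
    rw [List.filter_flatMap]
    have hinner : ∀ k : String,
        (xs.filter (fun s => pvName s == k)).filter (fun y => pvName y == k0)
          = if k = k0 then xs.filter (fun y => pvName y == k0) else [] := by
      intro k
      by_cases e : k = k0
      · subst e; simp [List.filter_filter]
      · rw [if_neg e]
        apply List.filter_eq_nil_iff.mpr
        intro a ha
        have : pvName a = k := by simpa using (List.mem_filter.mp ha).2
        simp [this, e]
    calc (PySem.List.sorted (PySem.Set.ofList (xs.map pvName)) (fun k => k) false).flatMap
          (fun k => (xs.filter (fun s => pvName s == k)).filter (fun y => pvName y == k0))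
        = (PySem.List.sorted (PySem.Set.ofList (xs.map pvName)) (fun k => k) false).flatMap
          (fun k => if k = k0 then xs.filter (fun y => pvName y == k0) else []) := by
          simp only [hinner]
      _ = xs.filter (fun y => pvName y == k0) := by
          rw [pv_flatMap_single k0 _ _ hnd]
          by_cases hmem : k0 ∈ PySem.List.sorted (PySem.Set.ofList (xs.map pvName)) (fun k => k) false
          · rw [if_pos hmem]
          · rw [if_neg hmem]
            symm
            apply List.filter_eq_nil_iff.mpr
            intro a ha hc
            apply hmem
            rw [PySem.List.mem_sorted, PySem.Set.mem_ofList]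
            exact List.mem_map.mpr ⟨a, ha, by simpa using hc⟩
      _ = (PySem.List.sorted xs pvName false).filter (fun y => pvName y == k0) :=
          (pv_filter_sorted pvName k0 xs).symm

-- ===== VERDICT (by name: the statement is the Claim_ definition above) =====
theorem group_sites_by_name_spec : Claim_equal_group_sites_by_name := by
  intro sites _ _
  unfold Spec_group_sites_by_name group_sites_by_name group_sites_by_name_alt
  simp only []
  rw [pv_groupedA_eq, PySem.List.foldl_append_eq_flatMap, pv_keys_grouped]
  simp only [pv_getD_grouped]
  simpa using pv_main sites
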